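-- pv_equiv track=rewrite | github.com/rishabhjain02/Data-Structures-And-Algorithms | Stacks/Sort stack using another stack.py | solve
-- ===== SOURCE A (Python) =====
-- def empty(stack):
--     return stack == []
--
-- def solve(stack1):
--     stack2 = []
--     stack3 = []
--
--     while(not empty(stack1)):
--         value = stack1.pop()
--         stack2.append(value)
--
--     while(not empty(stack2)):
--         value = stack2.pop()
--
--         if empty(stack1):
--             stack1.append(value)
--
--         else:
--             while (not empty(stack1)) and (stack1[-1] > value):
--                 temp = stack1.pop()
--                 stack3.append(temp)
--             stack1.append(value)
--
--             while(not empty(stack3)):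
--                 temp = stack3.pop()
--                 stack1.append(temp)
--
--     return stack1
-- ===== SOURCE B (Python) =====
-- # B: selection sort -- repeatedly remove the minimum and append it to the result.
-- # Note: A sorts the given list object in place and returns it; B builds a fresh
-- # list and does not mutate its argument (the equivalence claimed is about the
-- # return value only).
-- def solve(stack1):
--     result = []
--     xs = list(stack1)
--     while xs:
--         m = min(xs)
--         xs.remove(m)
--         result.append(m)
--     return result
-- ===== Notes on version B (the rewrite author's own statement) =====
-- stated objective: simpler
-- what changed: Replaced the three-stack pop/push insertion scheme with a plain selection sort that repeatedly removes the minimum of the remaining elements and appends it to the output; B does not mutate the argument (return values agree, proved).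
import Mathlib
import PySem

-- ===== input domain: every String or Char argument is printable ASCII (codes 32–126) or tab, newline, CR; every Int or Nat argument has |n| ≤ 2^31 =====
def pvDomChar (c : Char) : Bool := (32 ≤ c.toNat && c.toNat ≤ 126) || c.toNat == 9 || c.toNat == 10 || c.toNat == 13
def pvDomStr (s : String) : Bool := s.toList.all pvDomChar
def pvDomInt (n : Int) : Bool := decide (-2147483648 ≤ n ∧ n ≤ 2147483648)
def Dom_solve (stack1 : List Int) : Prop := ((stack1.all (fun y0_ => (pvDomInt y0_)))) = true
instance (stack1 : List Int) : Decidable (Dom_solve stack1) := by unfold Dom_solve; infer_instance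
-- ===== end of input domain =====

-- B replaces A's three-stack insertion scheme with a plain selection sort
-- (repeatedly remove the minimum); B builds a fresh list instead of sorting
-- the argument in place as A does — the equivalence is about the return value.

-- ===== PORT A =====
-- Stacks are modelled top-at-head; the Python list `stack1` is bottom-first,
-- so the port starts from `stack1.reverse` and reverses back at the end.

-- `while not empty(src): dst.append(src.pop())`
def moveAll : List Int → List Int → List Int
  | [], d => d
  | x :: s, d => moveAll s (x :: d)

-- `while (not empty(stack1)) and (stack1[-1] > value): stack3.append(stack1.pop())`
def popGT : List Int → List Int → Int → List Int × List Int
  | [], s3, _ => ([], s3)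
  | x :: s1, s3, v => if x > v then popGT s1 (x :: s3) v else (x :: s1, s3)

-- the outer `while not empty(stack2)` loop
def outerLoop : List Int → List Int → List Int
  | [], s1 => s1
  | v :: s2, s1 =>
    match s1 with
    | [] => outerLoop s2 [v]
    | _ :: _ =>
      let p := popGT s1 [] v
      outerLoop s2 (moveAll p.2 (v :: p.1))

def solve (stack1 : List Int) : List Int :=
  (outerLoop (moveAll stack1.reverse []) []).reverse

-- ===== PORT B =====
-- `while xs: m = min(xs); xs.remove(m); result.append(m)`
def selGo : List Int → List Int → List Int
  | [], acc => acc
  | x :: xs, acc =>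
    match _h : PySem.List.min? (x :: xs) (fun y => y) with
    | none => acc  -- unreachable: min? of a nonempty list is some
    | some m =>
      match h2 : PySem.List.remove? (x :: xs) m with
      | none => acc  -- unreachable: ValueError cannot happen, m ∈ xs
      | some rest => selGo rest (acc ++ [m])
termination_by xs _ => xs.length
decreasing_by
  have hm : m ∈ x :: xs := by
    by_contra hnot
    rw [(PySem.List.remove?_eq_none_iff _ _).2 hnot] at h2
    exact absurd h2 (by simp)
  have he := PySem.List.remove?_eq_some_erase _ m hm
  rw [he] at h2
  have h3 : rest = (x :: xs).erase m := Option.some.inj h2.symm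
  have h4 := List.length_erase_of_mem hm
  rw [h3, h4]
  simp

def solve_alt (stack1 : List Int) : List Int := selGo stack1 []

-- ===== PRECONDITION & SPEC =====
def Spec_solve (stack1 : List Int) (out : List Int) : Prop := out = solve_alt stack1
instance (stack1 : List Int) (out : List Int) : Decidable (Spec_solve stack1 out) := by unfold Spec_solve; infer_instance

-- ===== CLAIM (what is proved, stated in full; the proofs are below) =====
def Claim_equal_solve : Prop := ∀ (stack1 : List Int), Dom_solve stack1 → Spec_solve stack1 (solve stack1)

-- ===== LEMMAS AND PROOFS =====

-- simple insertion into a descending-sorted list; the popGT/moveAll dance equals it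
def insertD (v : Int) : List Int → List Int
  | [] => [v]
  | x :: s => if x > v then x :: insertD v s else v :: x :: s

theorem moveAll_eq (s d : List Int) : moveAll s d = s.reverse ++ d := by
  induction s generalizing d with
  | nil => simp [moveAll]
  | cons x s ih => simp [moveAll, ih]

theorem popGT_move (v : Int) (s s3 : List Int) :
    moveAll (popGT s s3 v).2 (v :: (popGT s s3 v).1) = moveAll s3 (insertD v s) := by
  induction s generalizing s3 with
  | nil => simp [popGT, insertD]
  | cons x t ih =>
    by_cases h : x > v
    · simp [popGT, insertD, h, ih, moveAll]
    · simp [popGT, insertD, h]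

theorem outerLoop_eq_foldl (s2 s1 : List Int) :
    outerLoop s2 s1 = s2.foldl (fun s v => insertD v s) s1 := by
  induction s2 generalizing s1 with
  | nil => simp [outerLoop]
  | cons v s2 ih =>
    cases s1 with
    | nil => simp [outerLoop, ih, insertD]
    | cons x t =>
      show outerLoop s2 (moveAll (popGT (x :: t) [] v).2 (v :: (popGT (x :: t) [] v).1)) = _
      rw [popGT_move]
      simp [moveAll, ih]

theorem insertD_perm (v : Int) (s : List Int) : (insertD v s).Perm (v :: s) := by
  induction s with
  | nil => simp [insertD]
  | cons x t ih =>
    by_cases h : x > v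
    · simp only [insertD, if_pos h]
      exact ((ih.cons x).trans (List.Perm.swap v x t))
    · simp [insertD, h]

theorem insertD_pairwise (v : Int) (s : List Int) (hs : s.Pairwise (· ≥ ·)) :
    (insertD v s).Pairwise (· ≥ ·) := by
  induction s with
  | nil => simp [insertD]
  | cons x t ih =>
    rcases List.pairwise_cons.1 hs with ⟨hx, ht⟩
    by_cases h : x > v
    · simp only [insertD, if_pos h]
      refine List.pairwise_cons.2 ⟨?_, ih ht⟩
      intro b hb
      have : b ∈ v :: t := (insertD_perm v t).mem_iff.1 hb
      rcases List.mem_cons.1 this with rfl | hbt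
      · exact le_of_lt h
      · exact hx b hbt
    · simp only [insertD, if_neg h]
      refine List.pairwise_cons.2 ⟨?_, hs⟩
      intro b hb
      rcases List.mem_cons.1 hb with rfl | hbt
      · omega
      · have := hx b hbt; omega

theorem foldl_insertD_perm (s2 s1 : List Int) :
    (s2.foldl (fun s v => insertD v s) s1).Perm (s1 ++ s2) := by
  induction s2 generalizing s1 with
  | nil => simp
  | cons v s2 ih =>
    simp only [List.foldl_cons]
    refine (ih (insertD v s1)).trans ?_
    have h1 : (insertD v s1 ++ s2).Perm ((v :: s1) ++ s2) :=
      (insertD_perm v s1).append_right s2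
    refine h1.trans ?_
    simpa using (List.perm_middle (a := v) (l₁ := s1) (l₂ := s2)).symm.symm |>.symm

theorem foldl_insertD_pairwise (s2 s1 : List Int) (h : s1.Pairwise (· ≥ ·)) :
    (s2.foldl (fun s v => insertD v s) s1).Pairwise (· ≥ ·) := by
  induction s2 generalizing s1 with
  | nil => simpa
  | cons v s2 ih => exact ih _ (insertD_pairwise v s1 h)

theorem solve_perm (stack1 : List Int) : (solve stack1).Perm stack1 := by
  unfold solve
  rw [moveAll_eq]
  simp only [List.reverse_reverse, List.append_nil]
  rw [outerLoop_eq_foldl]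
  exact (List.reverse_perm _).trans (by simpa using foldl_insertD_perm stack1 [])

theorem solve_sorted (stack1 : List Int) : (solve stack1).Pairwise (· ≤ ·) := by
  unfold solve
  rw [moveAll_eq]
  simp only [List.reverse_reverse, List.append_nil]
  rw [outerLoop_eq_foldl]
  rw [List.pairwise_reverse]
  exact foldl_insertD_pairwise stack1 [] (by simp)

theorem selGo_spec (n : Nat) (xs acc : List Int) (hn : xs.length ≤ n)
    (hacc : acc.Pairwise (· ≤ ·)) (hle : ∀ a ∈ acc, ∀ b ∈ xs, a ≤ b) :
    (selGo xs acc).Pairwise (· ≤ ·) ∧ (selGo xs acc).Perm (acc ++ xs) := by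
  induction n generalizing xs acc with
  | zero =>
    have : xs = [] := List.length_eq_zero_iff.1 (Nat.le_zero.1 hn)
    subst this
    unfold selGo
    simpa using hacc
  | succ n ih =>
    cases xs with
    | nil =>
      unfold selGo
      simpa using hacc
    | cons x t =>
      unfold selGo
      split
      next hmin =>
        exact absurd ((PySem.List.min?_eq_none_iff _ _).1 hmin) (by simp)
      next m hmin =>
        split
        next hrem =>
          have hm : m ∈ x :: t := PySem.List.min?_mem hmin
          rw [PySem.List.remove?_eq_none_iff] at hrem
          exact absurd hm hrem
        next rest hrem =>
          have hm : m ∈ x :: t := PySem.List.min?_mem hmin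
          have hmle : ∀ y ∈ x :: t, m ≤ y := by
            intro y hy; exact PySem.List.min?_isMin hmin y hy
          have herase : rest = (x :: t).erase m := by
            have he := PySem.List.remove?_eq_some_erase _ m hm
            rw [he] at hrem
            exact Option.some.inj hrem.symm
          have hlen : rest.length ≤ n := by
            have h4 := List.length_erase_of_mem hm
            rw [herase, h4]
            simp only [List.length_cons] at hn ⊢
            omega
          have hperm : (x :: t).Perm (m :: rest) := by
            rw [herase]; exact List.perm_cons_erase hm
          have hsub : ∀ b ∈ rest, b ∈ x :: t := by
            intro b hb
            exact hperm.symm.subset (List.mem_cons_of_mem m hb)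
          have hacc' : (acc ++ [m]).Pairwise (· ≤ ·) := by
            rw [List.pairwise_append]
            refine ⟨hacc, by simp, ?_⟩
            intro a ha b hb
            simp at hb
            rw [hb]
            exact hle a ha m hm
          have hle' : ∀ a ∈ acc ++ [m], ∀ b ∈ rest, a ≤ b := by
            intro a ha b hb
            rcases List.mem_append.1 ha with ha' | ha'
            · exact hle a ha' b (hsub b hb)
            · simp at ha'
              rw [ha']
              exact hmle b (hsub b hb)
          rcases ih rest (acc ++ [m]) hlen hacc' hle' with ⟨hs, hp⟩
          refine ⟨hs, hp.trans ?_⟩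
          have he2 : (acc ++ [m]) ++ rest = acc ++ (m :: rest) := by simp
          rw [he2]
          exact List.Perm.append_left acc hperm.symm

theorem solve_alt_spec (stack1 : List Int) :
    (solve_alt stack1).Pairwise (· ≤ ·) ∧ (solve_alt stack1).Perm stack1 := by
  have := selGo_spec stack1.length stack1 [] le_rfl (by simp) (by simp)
  simpa [solve_alt] using this

-- ===== VERDICT (by name: the statement is the Claim_ definition above) =====
theorem solve_spec : Claim_equal_solve := by
  intro stack1 _
  show solve stack1 = solve_alt stack1
  rcases solve_alt_spec stack1 with ⟨hbs, hbp⟩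
  exact List.Perm.eq_of_pairwise' (solve_sorted stack1) hbs
    ((solve_perm stack1).trans hbp.symm)
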